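-- pv_equiv track=rewrite | github.com/antoine-agre/nurse_rostering | nurse_rostering/model/solution.py | _fix_min_work_days
-- ===== SOURCE A (Python) =====
-- from typing import List, Union, Optional, Any
--
-- PersonnalSchedule = List[Optional[int]]
--
-- def _fix_min_work_days(schedule: PersonnalSchedule, min_shifts: int) -> PersonnalSchedule:
--     """Replace worked day blocks below minimum size by rest days."""
--     start: Any = None
--     end: Any = None
--     for i in range(len(schedule)):
--         if start == None:
--             if schedule[i] == -1:
--                 start = i
--         if start != None:
--             if i == len(schedule)-1 or schedule[i+1] != -1:
--                 end = i
--                 if (end - start + 1) < min_shifts: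
--                     for j in range(start, end + 1):
--                         schedule[j] = None
--                 start, end = None, None
--     return schedule
-- ===== SOURCE B (Python) =====
-- def _fix_min_work_days(schedule, min_shifts):
--     """Replace worked day blocks below minimum size by rest days."""
--     n = len(schedule)
--     left = [0] * n   # consecutive worked cells ending at i
--     right = [0] * n  # consecutive worked cells starting at i
--     for i in range(n):
--         if schedule[i] == -1:
--             left[i] = 1 + (left[i - 1] if i > 0 else 0)
--     for i in reversed(range(n)):
--         if schedule[i] == -1:
--             right[i] = 1 + (right[i + 1] if i + 1 < n else 0)
--     for i in range(n):
--         if schedule[i] == -1 and left[i] + right[i] - 1 < min_shifts: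
--             schedule[i] = None
--     return schedule
-- ===== Notes on version B (the rewrite author's own statement) =====
-- stated objective: alternative
-- what changed: A's single-pass start/end boundary state machine is replaced by a three-pass per-cell dynamic programming: build left[i]/right[i] arrays of consecutive worked-cell counts ending/starting at i, then blank cell i exactly when it is worked and left[i]+right[i]-1 < min_shifts; both mutate the argument in place to the same contents.
import Mathlib
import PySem

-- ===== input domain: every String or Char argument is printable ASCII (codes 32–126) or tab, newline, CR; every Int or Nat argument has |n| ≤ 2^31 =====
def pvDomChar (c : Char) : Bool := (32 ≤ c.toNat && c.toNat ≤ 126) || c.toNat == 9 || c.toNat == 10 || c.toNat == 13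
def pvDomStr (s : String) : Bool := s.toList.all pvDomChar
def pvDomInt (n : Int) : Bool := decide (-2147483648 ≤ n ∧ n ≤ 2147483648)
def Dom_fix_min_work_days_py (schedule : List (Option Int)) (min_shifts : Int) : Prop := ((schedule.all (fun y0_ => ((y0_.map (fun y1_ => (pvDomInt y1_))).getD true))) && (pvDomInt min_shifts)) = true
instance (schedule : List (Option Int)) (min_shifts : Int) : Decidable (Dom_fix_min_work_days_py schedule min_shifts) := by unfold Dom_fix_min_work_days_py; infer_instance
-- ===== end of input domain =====

-- B replaces A's start/end boundary state machine by a three-pass per-cell dynamic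
-- programming (left/right consecutive-worked-cell counts, then pointwise blanking);
-- equivalence is about the return value (both Pythons also mutate `schedule` in place
-- to the same final contents).

-- ===== PORT A =====
-- one iteration of A's `for i in range(len(schedule))` loop; state = (schedule, start).
-- Every index read is in range (0 ≤ i < n), so List.getD is exact for Python's schedule[i];
-- at i+1 = n the `or` has already short-circuited, and getD's default none ≠ some (-1) agrees.
def pvStepA (n : Nat) (min_shifts : Int) (st : List (Option Int) × Option Nat) (i : Nat) :
    List (Option Int) × Option Nat :=
  let sch := st.1
  let start : Option Nat :=
    match st.2 with
    | none => if sch.getD i none == some (-1) then some i else none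
    | some s => some s
  match start with
  | none => (sch, none)
  | some s =>
      if i == n - 1 || !(sch.getD (i + 1) none == some (-1)) then
        -- end = i; blank schedule[j] for j in range(start, end+1) if the block is short
        let sch :=
          if ((i : Int) - (s : Int) + 1) < min_shifts then
            (List.range' s (i + 1 - s)).foldl (fun l j => l.set j none) sch
          else sch
        (sch, none)
      else (sch, some s)

def fix_min_work_days_py (schedule : List (Option Int)) (min_shifts : Int) : List (Option Int) :=
  ((List.range schedule.length).foldl (pvStepA schedule.length min_shifts) (schedule, none)).1

-- ===== PORT B =====
-- Source B's first loop: left[i] = 1 + left[i-1] if schedule[i] == -1 else 0,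
-- transcribed as the scan it is, with `prev` carrying left[i-1].
def pvLeftList (prev : Int) : List (Option Int) → List Int
  | [] => []
  | x :: xs => if x == some (-1) then (1 + prev) :: pvLeftList (1 + prev) xs
               else 0 :: pvLeftList 0 xs

-- Source B's second (right-to-left) loop: right[i] = 1 + right[i+1] if schedule[i] == -1 else 0;
-- headD 0 is right[i+1] (0 past the end, as the fresh array cell Python reads is 0 there).
def pvRightList : List (Option Int) → List Int
  | [] => []
  | x :: xs => (if x == some (-1) then 1 + (pvRightList xs).headD 0 else 0) :: pvRightList xs

-- Source B's third loop: blank worked cells whose run length left[i]+right[i]-1 is below min_shifts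
def pvCombine (m : Int) : List (Option Int) → List Int → List Int → List (Option Int)
  | x :: xs, l :: ls, r :: rs =>
      (if x == some (-1) ∧ l + r - 1 < m then none else x) :: pvCombine m xs ls rs
  | xs, _, _ => xs

def fix_min_work_days_py_alt (schedule : List (Option Int)) (min_shifts : Int) : List (Option Int) :=
  pvCombine min_shifts schedule (pvLeftList 0 schedule) (pvRightList schedule)

-- ===== PRECONDITION & SPEC =====
def Spec_fix_min_work_days_py (schedule : List (Option Int)) (min_shifts : Int) (out : List (Option Int)) : Prop := out = fix_min_work_days_py_alt schedule min_shifts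
instance (schedule : List (Option Int)) (min_shifts : Int) (out : List (Option Int)) : Decidable (Spec_fix_min_work_days_py schedule min_shifts out) := by unfold Spec_fix_min_work_days_py; infer_instance

-- ===== CLAIM (what is proved, stated in full; the proofs are below) =====
def Claim_equal_fix_min_work_days_py : Prop := ∀ (schedule : List (Option Int)) (min_shifts : Int), Dom_fix_min_work_days_py schedule min_shifts → Spec_fix_min_work_days_py schedule min_shifts (fix_min_work_days_py schedule min_shifts)

-- ===== LEMMAS AND PROOFS =====

-- proof-side intermediate: the run-grouping view of the task (not part of either port)
def pvAltGo (min_shifts : Int) : List (Option Int) → List (Option Int)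
  | [] => []
  | x :: xs =>
    if h : x == some (-1) then
      (if (((x :: xs).takeWhile (fun v => v == some (-1))).length : Int) < min_shifts then
         List.replicate ((x :: xs).takeWhile (fun v => v == some (-1))).length none
       else (x :: xs).takeWhile (fun v => v == some (-1)))
        ++ pvAltGo min_shifts ((x :: xs).dropWhile (fun v => v == some (-1)))
    else x :: pvAltGo min_shifts xs
  termination_by l => l.length
  decreasing_by
  · simp [h]
    exact List.length_dropWhile_le _ _
  · simp

lemma pvBlank_spec (k : Nat) : ∀ (s : Nat) (sch : List (Option Int)), s + k ≤ sch.length →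
    (List.range' s k).foldl (fun l j => l.set j none) sch
      = sch.take s ++ List.replicate k none ++ sch.drop (s + k) := by
  induction k with
  | zero => intro s sch _h; simp
  | succ k ih =>
    intro s sch h
    rw [List.range'_succ, List.foldl_cons, ih (s+1) (sch.set s none) (by simp; omega)]
    have hs : s < sch.length := by omega
    have hset : sch.set s none = sch.take s ++ none :: sch.drop (s + 1) := by
      rw [List.set_eq_take_append_cons_drop, if_pos hs]
    rw [hset]
    have hlt : (sch.take s).length = s := by simp; omega
    rw [List.take_append, List.drop_append]
    simp [hlt, List.replicate_succ]
    rw [List.take_of_length_le (by simp [hlt]), List.drop_of_length_le (by simp [hlt]; omega)]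
    have h2 : s + 1 + k - s = k + 1 := by omega
    rw [h2]
    simp [List.drop_drop]
    ring_nf

lemma pvRun_aux (m : Int) (c : Nat) : ∀ (s i : Nat) (sch : List (Option Int)),
    1 ≤ c → s ≤ i → i + c ≤ sch.length →
    (∀ j, i ≤ j → j < i + c → sch.getD j none = some (-1)) →
    (i + c = sch.length ∨ sch.getD (i + c) none ≠ some (-1)) →
    (List.range' i c).foldl (pvStepA sch.length m) (sch, some s)
      = (if ((i : Int) + c - s) < m then
           sch.take s ++ List.replicate (i + c - s) none ++ sch.drop (i + c)
         else sch, none) := by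
  induction c with
  | zero => intro s i sch h1 _ _ _ _; omega
  | succ c ih =>
    intro s i sch h1 h2 h3 h4 h5
    rcases Nat.eq_zero_or_pos c with hc | hc
    · subst hc
      have hcond : (i == sch.length - 1 || !(sch.getD (i + 1) none == some (-1))) = true := by
        rcases h5 with h5 | h5
        · simp; omega
        · simp only [Bool.or_eq_true, beq_iff_eq, Bool.not_eq_eq_eq_not, Bool.not_true,
            beq_eq_false_iff_ne]
          right; simpa using h5
      simp only [List.range'_succ, List.range'_zero, List.foldl_cons, List.foldl_nil]
      rw [pvStepA]
      simp only [hcond, if_true]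
      have hlen : s + (i + 1 - s) ≤ sch.length := by omega
      by_cases hm : ((i : Int) + 1 - s) < m
      · rw [if_pos (by omega : ((i:Int) - s + 1) < m)]
        rw [if_pos (by push_cast; omega : ((i:Int) + ((0:Nat)+1 : Nat) - s) < m)]
        rw [pvBlank_spec (i + 1 - s) s sch hlen]
        rw [show s + (i + 1 - s) = i + 1 by omega, show i + ((0:Nat) + 1) - s = i + 1 - s by omega,
          show i + ((0:Nat) + 1) = i + 1 by omega]
      · rw [if_neg (by omega : ¬ ((i:Int) - s + 1) < m)]
        rw [if_neg (by push_cast at hm ⊢; omega : ¬ ((i:Int) + ((0:Nat)+1 : Nat) - s) < m)]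
    · have hne : (i == sch.length - 1) = false := by simp; omega
      have hnext : sch.getD (i + 1) none = some (-1) := h4 (i+1) (by omega) (by omega)
      simp only [List.range'_succ, List.foldl_cons]
      rw [pvStepA]
      simp only [hne, hnext, beq_self_eq_true, Bool.not_true, Bool.or_false,
        Bool.false_eq_true, if_false]
      have h5' : i + 1 + c = sch.length ∨ sch.getD (i + 1 + c) none ≠ some (-1) := by
        rcases h5 with h5 | h5
        · left; omega
        · right
          have e : i + 1 + c = i + (c + 1) := by omega
          rw [e]; exact h5
      have := ih s (i+1) sch hc (by omega) (by omega)
        (fun j hj1 hj2 => h4 j (by omega) (by omega)) h5'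
      rw [this]
      have e1 : ((i:Int) + 1 + (c:Int) - s) = ((i:Int) + ((c:Int)+1) - s) := by ring
      have e2 : i + 1 + c = i + (c + 1) := by omega
      rw [show ((i+1 : Nat) : Int) = (i:Int) + 1 by push_cast; ring, e1, e2]
      norm_cast

lemma pvMain (m : Int) (k : Nat) : ∀ (i : Nat) (sch : List (Option Int)), i + k = sch.length →
    ((List.range' i k).foldl (pvStepA sch.length m) (sch, none)).1
      = sch.take i ++ pvAltGo m (sch.drop i) := by
  induction k using Nat.strong_induction_on with
  | _ k ih =>
    intro i sch hk
    match k, hk with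
    | 0, hk =>
      simp only [List.range'_zero, List.foldl_nil]
      rw [List.take_of_length_le (by omega), List.drop_eq_nil_of_le (by omega), pvAltGo]
      simp
    | (k'+1), hk =>
      have hi : i < sch.length := by omega
      have hdrop : sch.drop i = sch[i] :: sch.drop (i+1) := List.drop_eq_getElem_cons hi
      by_cases hx : sch[i] = some (-1)
      · -- a run of -1 starts at i
        set p : Option Int → Bool := fun v => v == some (-1) with hp
        set t := (sch.drop i).takeWhile p with ht
        set r := t.length with hr
        have htd : t ++ (sch.drop i).dropWhile p = sch.drop i := List.takeWhile_append_dropWhile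
        have hrlen : r ≤ k' + 1 := by
          have := congrArg List.length htd
          simp at this
          omega
        have hr1 : 1 ≤ r := by
          rw [hr, ht, hdrop, List.takeWhile_cons, if_pos (by simp [hp, hx])]
          simp
        have hdw : (sch.drop i).dropWhile p = sch.drop (i + r) := by
          have h := List.drop_left' (l₁ := t) (l₂ := (sch.drop i).dropWhile p) hr.symm
          rw [htd] at h
          rw [← h, List.drop_drop]
        have htake : t = (sch.drop i).take r := by
          have h := List.take_left' (l₁ := t) (l₂ := (sch.drop i).dropWhile p) hr.symm
          rw [htd] at h
          exact h.symm
        have hrun : ∀ j, i ≤ j → j < i + r → sch.getD j none = some (-1) := by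
          intro j hj1 hj2
          have hjl : j < sch.length := by omega
          have h1 : j - i < r := by omega
          have h2 : j - i < (sch.drop i).length := by simp; omega
          rw [List.getD_eq_getElem sch none hjl]
          have : sch[j] = (sch.drop i)[j - i]'h2 := by
            rw [List.getElem_drop]; congr 1; omega
          rw [this]
          have h2' : j - i < (List.take r (sch.drop i)).length := by simp; omega
          have e : (List.take r (sch.drop i))[j - i]'h2' = (sch.drop i)[j - i]'h2 :=
            List.getElem_take
          have hmem : (sch.drop i)[j - i]'h2 ∈ t := by
            rw [htake, ← e]
            exact List.getElem_mem h2'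
          have := List.mem_takeWhile_imp (ht ▸ hmem)
          simpa [hp] using this
        have hbound : i + r = sch.length ∨ sch.getD (i + r) none ≠ some (-1) := by
          by_cases hend : i + r = sch.length
          · exact Or.inl hend
          · right
            have hlt : i + r < sch.length := by omega
            have hne : (sch.drop i).dropWhile p ≠ [] := by
              rw [hdw]
              simp
              omega
            have := List.head_dropWhile_not p hne
            have hcons : (sch.drop i).dropWhile p = sch[i+r]'hlt :: sch.drop (i + r + 1) := by
              rw [hdw]; exact List.drop_eq_getElem_cons hlt
            simp only [hcons, List.head_cons] at this
            rw [List.getD_eq_getElem sch none hlt]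
            simpa [hp] using this
        -- split the loop: run part, then the rest
        have hsplit : List.range' i (k' + 1) = List.range' i r ++ List.range' (i + r) (k' + 1 - r) := by
          rw [show i + r = i + 1 * r by omega]
          rw [List.range'_append]
          congr 1
          omega
        have hstep0 : pvStepA sch.length m (sch, none) i = pvStepA sch.length m (sch, some i) i := by
          rw [pvStepA, pvStepA]
          simp [List.getElem?_eq_getElem hi, hx]
        have hconv : List.foldl (pvStepA sch.length m) (sch, none) (List.range' i r)
            = List.foldl (pvStepA sch.length m) (sch, some i) (List.range' i r) := by
          obtain ⟨r', hr'⟩ : ∃ r', r = r' + 1 := ⟨r - 1, by omega⟩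
          rw [hr', List.range'_succ]
          simp only [List.foldl_cons, hstep0]
        rw [hsplit, List.foldl_append, hconv]
        rw [pvRun_aux m r i i sch hr1 (le_refl i) (by omega) hrun hbound]
        have hsimp : ((i:Int) + r - i) = (r:Int) := by ring
        rw [hsimp, show i + r - i = r by omega]
        -- the schedule after the run, sch'
        by_cases hm : (r : Int) < m
        · rw [if_pos hm]
          set sch' : List (Option Int) := sch.take i ++ List.replicate r none ++ sch.drop (i + r) with hsch'
          have hlen' : sch'.length = sch.length := by
            rw [hsch']; simp; omega
          have := ih (k' + 1 - r) (by omega) (i + r) sch' (by omega)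
          rw [hlen'] at this
          rw [this]
          have htk : sch'.take (i + r) = sch.take i ++ List.replicate r none := by
            rw [hsch']; exact List.take_left' (by simp; omega)
          have hdr : sch'.drop (i + r) = sch.drop (i + r) := by
            rw [hsch']; exact List.drop_left' (by simp; omega)
          rw [htk, hdr]
          -- unfold pvAltGo on the -1 run
          rw [hdrop, pvAltGo]
          rw [dif_pos (by simp [hx])]
          rw [← hdrop, ← hp, ← ht, ← hr, if_pos hm, hdw]
          simp
        · rw [if_neg hm]
          have := ih (k' + 1 - r) (by omega) (i + r) sch (by omega)
          rw [this]
          have htk : sch.take (i + r) = sch.take i ++ t := by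
            rw [List.take_add, ← htake]
          rw [htk, List.append_assoc]
          congr 1
          rw [hdrop, pvAltGo, dif_pos (by simp [hx])]
          rw [← hdrop, ← hp, ← ht, ← hr, if_neg hm, hdw]
      · -- no run: single silent step
        rw [show k' + 1 = 1 + k' by omega, ← List.range'_append (s := i) (m := 1) (n := k') (step := 1)]
        rw [List.foldl_append]
        have hstep : pvStepA sch.length m (sch, none) i = (sch, none) := by
          rw [pvStepA]
          simp only [List.getD_eq_getElem sch none hi]
          simp [hx]
        simp only [List.range'_one, List.foldl_cons, List.foldl_nil, hstep]
        rw [show i + 1 * 1 = i + 1 by omega]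
        rw [ih k' (by omega) (i + 1) sch (by omega)]
        rw [hdrop, pvAltGo, dif_neg (by simp [hx])]
        rw [List.take_add_one]
        rw [List.getElem?_eq_getElem hi]
        rw [Option.toList_some]
        rw [List.append_assoc]
        rfl

-- ---- bridge: the run-grouping view equals B's per-cell DP ----

-- left[·] values produced inside a run of length b when left before the run is p
def pvUpL (p : Int) : Nat → List Int
  | 0 => []
  | b + 1 => (1 + p) :: pvUpL (1 + p) b

-- right[·] values produced inside a run of length b (counting down to 1)
def pvDownL : Nat → List Int
  | 0 => []
  | b + 1 => ((b : Int) + 1) :: pvDownL b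

lemma pvUpL_length (b : Nat) : ∀ p, (pvUpL p b).length = b := by
  induction b with
  | zero => intro p; rfl
  | succ b ih => intro p; simp [pvUpL, ih]

lemma pvDownL_length (b : Nat) : (pvDownL b).length = b := by
  induction b with
  | zero => rfl
  | succ b ih => simp [pvDownL, ih]

lemma pvLeft_reset (u : List (Option Int)) (hu : u.head? ≠ some (some (-1))) (p : Int) :
    pvLeftList p u = pvLeftList 0 u := by
  cases u with
  | nil => rfl
  | cons x xs =>
    have hx : (x == some (-1)) = false := by
      simp at hu ⊢; simpa using hu
    simp [pvLeftList, hx]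

lemma pvLeft_run (b : Nat) : ∀ (p : Int) (u : List (Option Int)),
    pvLeftList p (List.replicate b (some (-1)) ++ u) = pvUpL p b ++ pvLeftList (p + b) u := by
  induction b with
  | zero => intro p u; simp [pvUpL]
  | succ b ih =>
    intro p u
    rw [List.replicate_succ, List.cons_append]
    rw [pvLeftList]
    simp only [beq_self_eq_true, if_true]
    rw [ih (1 + p) u, pvUpL]
    have : 1 + p + (b : Int) = p + ((b : Nat) + 1 : Nat) := by push_cast; ring
    rw [this]
    simp

lemma pvRight_headD (u : List (Option Int)) (hu : u.head? ≠ some (some (-1))) :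
    (pvRightList u).headD 0 = 0 := by
  cases u with
  | nil => rfl
  | cons x xs =>
    have hx : (x == some (-1)) = false := by
      simp at hu ⊢; simpa using hu
    simp [pvRightList, hx]

lemma pvRight_run (b : Nat) (u : List (Option Int)) (hu : u.head? ≠ some (some (-1))) :
    pvRightList (List.replicate b (some (-1)) ++ u) = pvDownL b ++ pvRightList u := by
  induction b with
  | zero => simp [pvDownL]
  | succ b ih =>
    rw [List.replicate_succ, List.cons_append, pvRightList]
    simp only [beq_self_eq_true, if_true]
    rw [ih]
    have hh : (pvDownL b ++ pvRightList u).headD 0 = (b : Int) := by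
      cases b with
      | zero => simpa [pvDownL] using pvRight_headD u hu
      | succ b' => simp [pvDownL]
    rw [hh, pvDownL]
    have : (1 : Int) + b = (b : Int) + 1 := by ring
    rw [this]
    simp

lemma pvCombine_split (m : Int) (a : List (Option Int)) : ∀ (l1 r1 : List Int)
    (u : List (Option Int)) (l2 r2 : List Int), a.length = l1.length → a.length = r1.length →
    pvCombine m (a ++ u) (l1 ++ l2) (r1 ++ r2)
      = pvCombine m a l1 r1 ++ pvCombine m u l2 r2 := by
  induction a with
  | nil =>
    intro l1 r1 u l2 r2 h1 h2
    have hl : l1 = [] := List.eq_nil_of_length_eq_zero h1.symm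
    have hr : r1 = [] := List.eq_nil_of_length_eq_zero h2.symm
    subst hl; subst hr
    rfl
  | cons x xs ih =>
    intro l1 r1 u l2 r2 h1 h2
    cases l1 with
    | nil => simp at h1
    | cons l ls =>
      cases r1 with
      | nil => simp at h2
      | cons r rs =>
        simp only [List.cons_append, pvCombine]
        rw [ih ls rs u l2 r2 (by simpa using h1) (by simpa using h2)]

lemma pvCombine_run (m : Int) (b : Nat) : ∀ (p : Int),
    pvCombine m (List.replicate b (some (-1))) (pvUpL p b) (pvDownL b)
      = if p + b < m then List.replicate b none else List.replicate b (some (-1)) := by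
  induction b with
  | zero => intro p; simp [pvUpL, pvDownL, pvCombine]
  | succ b ih =>
    intro p
    rw [List.replicate_succ, pvUpL, pvDownL, pvCombine]
    have hc : (1 + p + ((b : Int) + 1) - 1 < m) ↔ (p + ((b : Nat) + 1 : Nat) < m) := by
      constructor <;> (intro h; push_cast at h ⊢; omega)
    rw [ih (1 + p)]
    have hc2 : (1 + p + (b : Int) < m) ↔ (p + ((b : Nat) + 1 : Nat) < m) := by
      constructor <;> (intro h; push_cast at h ⊢; omega)
    by_cases h : p + ((b : Nat) + 1 : Nat) < m
    · rw [if_pos (hc2.mpr h), if_pos h, if_pos (by exact ⟨rfl, hc.mpr h⟩), List.replicate_succ]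
    · rw [if_neg (fun hh => h (hc2.mp hh)), if_neg h,
        if_neg (fun hh => h (hc.mp hh.2))]

lemma pvAlt_eq_combine (m : Int) (n : Nat) : ∀ (sch : List (Option Int)), sch.length ≤ n →
    pvAltGo m sch = pvCombine m sch (pvLeftList 0 sch) (pvRightList sch) := by
  induction n with
  | zero =>
    intro sch h
    have : sch = [] := List.eq_nil_of_length_eq_zero (by omega)
    subst this
    rw [pvAltGo]
    rfl
  | succ n ih =>
    intro sch hlen
    cases hsch : sch with
    | nil => rw [pvAltGo]; rfl
    | cons x xs =>
      by_cases hx : x = some (-1)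
      · set p : Option Int → Bool := fun v => v == some (-1) with hp
        set t := (x :: xs).takeWhile p with ht
        set u := (x :: xs).dropWhile p with hu
        set r := t.length with hr
        have htd : t ++ u = x :: xs := List.takeWhile_append_dropWhile
        have hr1 : 1 ≤ r := by
          rw [hr, ht, List.takeWhile_cons, if_pos (by simp [hp, hx])]; simp
        have htrep : t = List.replicate r (some (-1)) := by
          apply List.eq_replicate_of_mem
          intro a ha
          have := List.mem_takeWhile_imp (ht ▸ ha)
          simpa [hp] using this
        have huh : u.head? ≠ some (some (-1)) := by
          cases hcu : u with
          | nil => simp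
          | cons y ys =>
            rw [hu] at hcu
            have hne : (x :: xs).dropWhile p ≠ [] := by rw [hcu]; simp
            have hhd := List.head_dropWhile_not p hne
            simp only [hcu, List.head_cons] at hhd
            simp only [List.head?_cons, ne_eq, Option.some.injEq]
            intro he; rw [he] at hhd; simp [hp] at hhd
        have hulen : u.length + r = xs.length + 1 := by
          have := congrArg List.length htd
          simp at this
          omega
        -- LHS
        rw [pvAltGo, dif_pos (by simp [hx]), ← hp, ← ht, ← hu, ← hr]
        -- RHS: rewrite sch as run ++ u
        have hsch2 : x :: xs = List.replicate r (some (-1)) ++ u := by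
          rw [← htrep, htd]
        rw [hsch2, pvLeft_run r 0 u, pvLeft_reset u huh, pvRight_run r u huh]
        rw [pvCombine_split m _ _ _ _ _ _
          (by simp [pvUpL_length]) (by simp [pvDownL_length])]
        rw [pvCombine_run m r 0]
        have hsl : sch.length = xs.length + 1 := by rw [hsch]; simp
        rw [← ih u (by omega)]
        have hcond : ((0 : Int) + r < m) ↔ ((r : Int) < m) := by omega
        congr 1
        by_cases hm : (r : Int) < m
        · rw [if_pos hm, if_pos (hcond.mpr hm)]
        · rw [if_neg hm, if_neg (fun h => hm (hcond.mp h)), htrep]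
      · rw [pvAltGo, dif_neg (by simp [hx])]
        have hx' : (x == some (-1)) = false := by simpa using hx
        rw [pvLeftList, pvRightList]
        simp only [hx', Bool.false_eq_true, if_false]
        rw [pvCombine, if_neg (by simp [hx] : ¬ ((x == some (-1)) = true ∧ (0:Int) + 0 - 1 < m))]
        have hxs : xs.length ≤ n := by
          have hsl : sch.length = xs.length + 1 := by rw [hsch]; simp
          omega
        rw [← ih xs hxs]

-- ===== VERDICT (by name: the statement is the Claim_ definition above) =====
theorem fix_min_work_days_py_spec : Claim_equal_fix_min_work_days_py := by
  intro schedule min_shifts _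
  unfold Spec_fix_min_work_days_py fix_min_work_days_py fix_min_work_days_py_alt
  have h := pvMain min_shifts schedule.length 0 schedule (by omega)
  simp only [List.drop_zero, List.take_zero, List.nil_append] at h
  rw [show List.range schedule.length = List.range' 0 schedule.length from List.range_eq_range', h]
  exact pvAlt_eq_combine min_shifts schedule.length schedule (le_refl _)
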